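-- pv_equiv track=rewrite | github.com/prog88/Python | runtracks/Day4/Job14/main.py | My_Long_Word
-- ===== SOURCE A (Python) =====
-- def Count(list):
--     count = 0
--     for element in list:
--         count += 1
--     return count
--
-- def Get_Space_Position(stringSrc, stringSize):
--     spacingIndexes = []
--     for index in range(0, stringSize):
--         if stringSrc[index] == " ":
--             spacingIndexes.append(index)
--     spacingIndexes.append(Count(stringSrc))
--     return spacingIndexes
--
-- def Extract_Word_That_Match(startPosition, endPosition, stringSrc):
--     characterBuffer = []
--     stringResult = ""
--     for index in range(startPosition+1, endPosition):
--         characterBuffer.append(stringSrc[index])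
--
--     for char in characterBuffer:
--         stringResult += char
--     return stringResult
--
-- def My_Long_Word(length, inputString):
--     result = ""
--     spacingArray = Get_Space_Position(inputString, Count(inputString))
--     for index in range(0, Count(spacingArray)-1 ):
--         num1 = spacingArray[index]
--         num2 = spacingArray[index+1]
--         if num2 - num1 > length + 1:
--             result += Extract_Word_That_Match(num1, num2, inputString)
--             result += " "
--     return result
-- ===== SOURCE B (Python) =====
-- # B: replaces A's space-index array, index-pair arithmetic and per-character copy loops
-- # with one split(' ') and a single pass over the word list (skipping the first word,
-- # which A never emits). Objective: simpler.
-- def My_Long_Word(length, inputString):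
--     result = ""
--     words = inputString.split(' ')
--     for word in words[1:]:
--         if len(word) > length:
--             result += word + " "
--     return result
-- ===== Notes on version B (the rewrite author's own statement) =====
-- stated objective: simpler
-- what changed: B replaces A's space-position index array, index-pair slice extraction and per-character copy loops with a single split(' ') and one pass over the resulting word list (skipping the first word, which A never emits); the measured speedup comes from dropping the per-character indexing and quadratic string concatenation of the extraction loops.
import Mathlib
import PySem

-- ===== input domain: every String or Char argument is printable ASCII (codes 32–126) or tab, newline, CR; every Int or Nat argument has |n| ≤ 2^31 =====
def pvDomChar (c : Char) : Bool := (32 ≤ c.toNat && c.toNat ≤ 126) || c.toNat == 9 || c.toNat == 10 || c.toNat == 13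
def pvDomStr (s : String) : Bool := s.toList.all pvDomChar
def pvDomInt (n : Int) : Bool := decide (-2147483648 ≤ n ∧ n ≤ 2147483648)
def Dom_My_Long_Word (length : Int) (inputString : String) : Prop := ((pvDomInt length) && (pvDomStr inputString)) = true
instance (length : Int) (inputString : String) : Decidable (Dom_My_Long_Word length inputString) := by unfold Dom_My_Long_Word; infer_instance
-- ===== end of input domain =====

-- B replaces A's space-position index array, index-pair slice extraction and per-character
-- copy loops with a single split(' ') and one pass over the word list (objective: simpler).

-- ===== PORT A =====
def pvCount {α : Type} (l : List α) : Int := l.foldl (fun c _ => c + 1) 0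

def Get_Space_Position (stringSrc : List Char) (stringSize : Int) : List Int :=
  (PySem.List.pyRange 0 stringSize 1).foldl
    (fun acc idx => if PySem.List.pyGet? stringSrc idx = some ' ' then acc ++ [idx] else acc) []
  ++ [pvCount stringSrc]

def Extract_Word_That_Match (startPosition endPosition : Int) (stringSrc : List Char) : List Char :=
  let characterBuffer := (PySem.List.pyRange (startPosition + 1) endPosition 1).foldl
      (fun buf idx => buf ++ (PySem.List.pyGet? stringSrc idx).toList) []
  characterBuffer.foldl (fun res c => res ++ [c]) []

def My_Long_Word (length : Int) (inputString : String) : String :=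
  let chars := inputString.toList
  let spacingArray := Get_Space_Position chars (pvCount chars)
  String.ofList ((PySem.List.pyRange 0 (pvCount spacingArray - 1) 1).foldl
    (fun result index =>
      let num1 := PySem.List.pyGetD spacingArray index 0
      let num2 := PySem.List.pyGetD spacingArray (index + 1) 0
      if length + 1 < num2 - num1 then
        result ++ Extract_Word_That_Match num1 num2 chars ++ [' ']
      else result) [])

-- ===== PORT B =====
def My_Long_Word_alt (length : Int) (inputString : String) : String :=
  let words := PySem.Chars.splitOn inputString.toList [' ']
  String.ofList ((PySem.List.slice words (some 1) none).foldl
    (fun result word => if length < (word.length : Int) then result ++ word ++ [' '] else result) [])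

-- ===== PRECONDITION & SPEC =====
def Spec_My_Long_Word (length : Int) (inputString : String) (out : String) : Prop := out = My_Long_Word_alt length inputString
instance (length : Int) (inputString : String) (out : String) : Decidable (Spec_My_Long_Word length inputString out) := by unfold Spec_My_Long_Word; infer_instance

-- ===== CLAIM (what is proved, stated in full; the proofs are below) =====
def Claim_equal_My_Long_Word : Prop := ∀ (length : Int) (inputString : String), Dom_My_Long_Word length inputString → Spec_My_Long_Word length inputString (My_Long_Word length inputString)

-- ===== LEMMAS AND PROOFS =====

-- the word list produced by s.split(' '), as a clean structural recursion
def pvTokens : List Char → List (List Char)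
  | [] => [[]]
  | c :: cs =>
    if c = ' ' then [] :: pvTokens cs
    else match pvTokens cs with
      | [] => [[c]]
      | t :: ts => (c :: t) :: ts

def pvConsHead (x : List Char) : List (List Char) → List (List Char)
  | [] => [x]
  | t :: ts => (x ++ t) :: ts

-- space positions of a string, as naturals
def pvSpN : List Char → List Nat
  | [] => []
  | c :: cs => (if c = ' ' then [0] else []) ++ (pvSpN cs).map (· + 1)

-- space positions with the string length appended (A's spacingArray, as naturals)
def pvEndsN (cs : List Char) : List Nat := pvSpN cs ++ [cs.length]

-- the adjacent index pairs A's main loop walks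
def pvPairs (cs : List Char) : List (Nat × Nat) := (pvEndsN cs).zip (pvEndsN cs).tail

-- per-pair emission of A, per-word emission of B
def pvDA (L : Int) (cs : List Char) (pq : Nat × Nat) : List Char :=
  if L + 1 < (pq.2 : Int) - (pq.1 : Int) then (cs.drop (pq.1 + 1)).take (pq.2 - pq.1 - 1) ++ [' '] else []

def pvDB (L : Int) (w : List Char) : List Char :=
  if L < (w.length : Int) then w ++ [' '] else []

lemma pvCount_aux {α : Type} (l : List α) : ∀ c : Int, l.foldl (fun c _ => c + 1) c = c + l.length := by
  induction l with
  | nil => simp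
  | cons x t ih => intro c; simp [List.foldl_cons, ih]; ring

lemma pvCount_eq {α : Type} (l : List α) : pvCount l = (l.length : Int) := by
  simp [pvCount, pvCount_aux]

lemma pvTokens_ne_nil (cs : List Char) : pvTokens cs ≠ [] := by
  cases cs with
  | nil => simp [pvTokens]
  | cons c t => unfold pvTokens; split; · simp
                split <;> simp

lemma pvGo_eq (l : List Char) : ∀ (fuel : Nat) (cur : List Char) (acc : List (List Char)),
    l.length ≤ fuel →
    PySem.Chars.splitOn.go [' '] fuel l cur acc = acc.reverse ++ pvConsHead cur.reverse (pvTokens l) := by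
  induction l with
  | nil =>
    intro fuel cur acc _
    cases fuel <;> simp [PySem.Chars.splitOn.go, pvTokens, pvConsHead]
  | cons c rest ih =>
    intro fuel cur acc hf
    cases fuel with
    | zero => simp at hf
    | succ fuel =>
      by_cases hc : c = ' '
      · subst hc
        have hpre : List.isPrefixOf [' '] (' ' :: rest) = true := by simp [List.isPrefixOf]
        rw [PySem.Chars.splitOn.go]
        simp only [hpre, if_pos, List.length_cons, List.length_nil, List.drop_succ_cons, List.drop_zero]
        rw [ih fuel [] (cur.reverse :: acc) (by simpa using hf)]
        obtain ⟨t, ts, ht⟩ : ∃ t ts, pvTokens rest = t :: ts := by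
          cases h : pvTokens rest with
          | nil => exact absurd h (pvTokens_ne_nil rest)
          | cons t ts => exact ⟨t, ts, rfl⟩
        simp [pvTokens, ht, pvConsHead]
      · have hpre : List.isPrefixOf [' '] (c :: rest) = false := by
          simp [List.isPrefixOf]; exact fun h => hc h.symm
        rw [PySem.Chars.splitOn.go]
        simp only [hpre]
        rw [ih fuel (c :: cur) acc (by simpa using Nat.le_of_succ_le_succ hf)]
        obtain ⟨t, ts, ht⟩ : ∃ t ts, pvTokens rest = t :: ts := by
          cases h : pvTokens rest with
          | nil => exact absurd h (pvTokens_ne_nil rest)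
          | cons t ts => exact ⟨t, ts, rfl⟩
        simp [pvTokens, hc, ht, pvConsHead]

lemma pvSplitOn_eq_tokens (cs : List Char) : PySem.Chars.splitOn cs [' '] = pvTokens cs := by
  rw [PySem.Chars.splitOn, pvGo_eq cs (cs.length + 1) [] [] (by omega)]
  obtain ⟨t, ts, ht⟩ : ∃ t ts, pvTokens cs = t :: ts := by
    cases h : pvTokens cs with
    | nil => exact absurd h (pvTokens_ne_nil cs)
    | cons t ts => exact ⟨t, ts, rfl⟩
  simp [ht, pvConsHead]

lemma pvTokens_head (v : List Char) : pvTokens v = v.takeWhile (· ≠ ' ') :: (pvTokens v).tail := by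
  induction v with
  | nil => simp [pvTokens]
  | cons c v ih =>
    by_cases hc : c = ' '
    · subst hc; simp [pvTokens, List.takeWhile]
    · rw [pvTokens]
      rw [if_neg hc]
      rw [ih]
      simp [List.takeWhile, hc]

lemma pvTokens_nospace (cs : List Char) (h : ' ' ∉ cs) : pvTokens cs = [cs] := by
  induction cs with
  | nil => simp [pvTokens]
  | cons c v ih =>
    have hc : ¬ (c = ' ') := fun e => h (e ▸ List.mem_cons_self)
    rw [pvTokens, if_neg hc, ih (fun m => h (List.mem_cons_of_mem _ m))]

lemma pvSpN_nospace (cs : List Char) (h : ' ' ∉ cs) : pvSpN cs = [] := by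
  induction cs with
  | nil => simp [pvSpN]
  | cons c v ih =>
    have hc : ¬ (c = ' ') := fun e => h (e ▸ List.mem_cons_self)
    simp [pvSpN, hc, ih (fun m => h (List.mem_cons_of_mem _ m))]

lemma pvTokens_decomp (u v : List Char) (h : ' ' ∉ u) : pvTokens (u ++ ' ' :: v) = u :: pvTokens v := by
  induction u with
  | nil => simp [pvTokens]
  | cons c u ih =>
    have hc : ¬ (c = ' ') := fun e => h (e ▸ List.mem_cons_self)
    rw [List.cons_append, pvTokens, if_neg hc, ih (fun m => h (List.mem_cons_of_mem _ m))]

lemma pvSpN_decomp (u v : List Char) (h : ' ' ∉ u) :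
    pvSpN (u ++ ' ' :: v) = u.length :: (pvSpN v).map (· + (u.length + 1)) := by
  induction u with
  | nil => simp [pvSpN]
  | cons c u ih =>
    have hc : ¬ (c = ' ') := fun e => h (e ▸ List.mem_cons_self)
    rw [List.cons_append, pvSpN, if_neg hc, ih (fun m => h (List.mem_cons_of_mem _ m))]
    simp only [hc, if_false, List.nil_append, List.map_cons, List.map_map, List.length_cons,
      List.cons.injEq]
    refine ⟨trivial, List.map_congr_left fun a _ => ?_⟩
    simp only [Function.comp_apply]
    omega

lemma pvSpN_lt (cs : List Char) : ∀ x ∈ pvSpN cs, x < cs.length := by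
  induction cs with
  | nil => simp [pvSpN]
  | cons c v ih =>
    intro x hx
    simp [pvSpN] at hx
    rcases hx with hx | ⟨a, ha, rfl⟩
    · simp [hx.2]
    · simpa using Nat.succ_lt_succ (ih a ha)

lemma pvEndsN_le (cs : List Char) : ∀ x ∈ pvEndsN cs, x ≤ cs.length := by
  intro x hx
  rcases List.mem_append.1 hx with h | h
  · exact le_of_lt (pvSpN_lt cs x h)
  · simp at h; omega

lemma pvEndsN_head (v : List Char) :
    ∃ es, pvEndsN v = (v.takeWhile (· ≠ ' ')).length :: es := by
  induction v with
  | nil => exact ⟨[], by simp [pvEndsN, pvSpN]⟩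
  | cons c v ih =>
    by_cases hc : c = ' '
    · subst hc
      exact ⟨(pvSpN v).map (· + 1) ++ [v.length + 1], by simp [pvEndsN, pvSpN, List.takeWhile]⟩
    · obtain ⟨es, hes⟩ := ih
      refine ⟨es.map (· + 1) ++ [], ?_⟩
      have : pvEndsN (c :: v) = (pvEndsN v).map (· + 1) := by
        simp [pvEndsN, pvSpN, hc]
      rw [this, hes]
      simp [List.takeWhile, hc]

lemma pvEndsN_decomp (u v : List Char) (h : ' ' ∉ u) :
    pvEndsN (u ++ ' ' :: v) = u.length :: (pvEndsN v).map (· + (u.length + 1)) := by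
  rw [pvEndsN, pvSpN_decomp u v h]
  simp [pvEndsN]
  omega

lemma pvFirstSpace (cs : List Char) (h : ' ' ∈ cs) :
    ∃ u v, cs = u ++ ' ' :: v ∧ ' ' ∉ u := by
  induction cs with
  | nil => simp at h
  | cons c t ih =>
    by_cases hc : c = ' '
    · exact ⟨[], t, by simp [hc], by simp⟩
    · have ht : ' ' ∈ t := by
        rcases List.mem_cons.1 h with h | h
        · exact absurd h.symm hc
        · exact h
      obtain ⟨u, v, rfl, hu⟩ := ih ht
      refine ⟨c :: u, v, rfl, ?_⟩
      intro m
      rcases List.mem_cons.1 m with m | m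
      · exact hc m.symm
      · exact hu m

lemma pvFilter_range (cs : List Char) :
    (List.range cs.length).filter (fun (k : Nat) => decide (PySem.List.pyGet? cs ((k : Nat) : Int) = some ' ')) = pvSpN cs := by
  induction cs with
  | nil => simp [pvSpN]
  | cons c v ih =>
    rw [List.length_cons, List.range_succ_eq_map, List.filter_cons, List.filter_map]
    have h0 : (decide (PySem.List.pyGet? (c :: v) (((0 : Nat) : Nat) : Int) = some ' ')) = decide (c = ' ') := by
      simp [PySem.List.pyGet?_zero_cons]
    have h1 : ((fun (k : Nat) => decide (PySem.List.pyGet? (c :: v) ((k : Nat) : Int) = some ' ')) ∘ Nat.succ)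
        = fun (k : Nat) => decide (PySem.List.pyGet? v ((k : Nat) : Int) = some ' ') := by
      funext k
      have : ((k.succ : Nat) : Int) = (k : Int) + 1 := by push_cast; ring
      simp [Function.comp, this, PySem.List.pyGet?_cons_succ]
    rw [h1, ih]
    by_cases hc : c = ' ' <;> simp [pvSpN, hc, h0, Nat.succ_eq_add_one]

lemma pvGSP_eq (cs : List Char) :
    Get_Space_Position cs (pvCount cs) = (pvEndsN cs).map (fun (n : Nat) => (n : Int)) := by
  rw [Get_Space_Position, pvCount_eq]
  have hb : (fun (acc : List Int) idx => if PySem.List.pyGet? cs idx = some ' ' then acc ++ [idx] else acc)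
      = fun acc idx => if (fun i => decide (PySem.List.pyGet? cs i = some ' ')) idx = true then acc ++ [id idx] else acc := by
    funext acc idx; simp
  rw [hb, PySem.List.foldl_append_if, PySem.List.pyRange_zero_nat, List.filter_map]
  have h1 : ((fun i => decide (PySem.List.pyGet? cs i = some ' ')) ∘ fun (k : Nat) => (k : Int))
      = fun (k : Nat) => decide (PySem.List.pyGet? cs ((k : Nat) : Int) = some ' ') := rfl
  rw [h1, pvFilter_range]
  simp [pvEndsN, pvCount_eq]

lemma pvBuffer_eq (cs : List Char) (p : Nat) : ∀ (q : Nat), q ≤ cs.length →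
    (PySem.List.pyRange ((p : Int) + 1) (q : Int) 1).foldl
      (fun buf idx => buf ++ (PySem.List.pyGet? cs idx).toList) []
    = (cs.drop (p + 1)).take (q - p - 1) := by
  intro q
  induction q with
  | zero => intro _; rw [PySem.List.pyRange_one_eq_nil (by positivity)]; simp
  | succ q ih =>
    intro hq
    by_cases hpq : q ≤ p
    · rw [PySem.List.pyRange_one_eq_nil (by push_cast; omega)]
      have : q + 1 - p - 1 = 0 := by omega
      simp [this]
    · have hcast : ((q + 1 : Nat) : Int) = (q : Int) + 1 := by push_cast; ring
      rw [hcast, PySem.List.pyRange_one_succ_right (by push_cast; omega), List.foldl_append]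
      rw [ih (by omega)]
      have hqlt : q < cs.length := by omega
      have : PySem.List.pyGet? cs (q : Int) = some cs[q] := by
        simp [PySem.List.pyGet?_natCast, List.getElem?_eq_getElem hqlt]
      simp only [List.foldl_cons, List.foldl_nil, this]
      have h2 : q + 1 - p - 1 = (q - p - 1) + 1 := by omega
      rw [h2, List.take_add_one]
      have h3 : (cs.drop (p + 1))[q - p - 1]? = some cs[q] := by
        rw [List.getElem?_drop]
        have : p + 1 + (q - p - 1) = q := by omega
        rw [this, List.getElem?_eq_getElem hqlt]
      rw [h3]

lemma pvExtract_eq (cs : List Char) (p q : Nat) (hq : q ≤ cs.length) :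
    Extract_Word_That_Match (p : Int) (q : Int) cs = (cs.drop (p + 1)).take (q - p - 1) := by
  rw [Extract_Word_That_Match]
  simp only [PySem.List.foldl_append_singleton, List.nil_append]
  exact pvBuffer_eq cs p q hq

lemma pvFoldl_range_pairs (f : List Char → Int → Int → List Char) :
    ∀ (ps : List Int) (hd : Int) (init : List Char),
    (List.range ps.length).foldl (fun r k => f r ((hd :: ps).getD k 0) ((hd :: ps).getD (k + 1) 0)) init
      = ((hd :: ps).zip ps).foldl (fun r pq => f r pq.1 pq.2) init := by
  intro ps
  induction ps with
  | nil => intro hd init; simp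
  | cons y t ih =>
    intro hd init
    rw [List.length_cons, List.range_succ_eq_map, List.foldl_cons, List.foldl_map]
    have : (fun (r : List Char) (k : Nat) => f r ((hd :: y :: t).getD k.succ 0) ((hd :: y :: t).getD (k.succ + 1) 0))
        = fun r k => f r ((y :: t).getD k 0) ((y :: t).getD (k + 1) 0) := by
      funext r k; simp [List.getD_cons_succ]
    rw [this, show (hd :: y :: t).getD 0 0 = hd from rfl,
      show (hd :: y :: t).getD (0 + 1) 0 = y from rfl, ih y (f init hd y)]
    simp [List.zip_cons_cons]

lemma pvFoldl_idx_pairs (f : List Char → Int → Int → List Char) (ps : List Int) (init : List Char) :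
    (PySem.List.pyRange 0 ((ps.length : Int) - 1) 1).foldl
      (fun r i => f r (PySem.List.pyGetD ps i 0) (PySem.List.pyGetD ps (i + 1) 0)) init
      = (ps.zip ps.tail).foldl (fun r pq => f r pq.1 pq.2) init := by
  cases ps with
  | nil => rw [PySem.List.pyRange_one_eq_nil (by simp)]; simp
  | cons hd t =>
    have hlen : ((hd :: t).length : Int) - 1 = (t.length : Int) := by simp
    rw [hlen, PySem.List.pyRange_zero_nat, List.foldl_map]
    have : (fun (r : List Char) (k : Nat) => f r (PySem.List.pyGetD (hd :: t) (k : Int) 0) (PySem.List.pyGetD (hd :: t) ((k : Int) + 1) 0))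
        = fun r k => f r ((hd :: t).getD k 0) ((hd :: t).getD (k + 1) 0) := by
      funext r k
      have hcast : ((k : Int) + 1) = ((k + 1 : Nat) : Int) := by push_cast; ring
      rw [hcast, PySem.List.pyGetD_natCast, PySem.List.pyGetD_natCast]
    rw [this, pvFoldl_range_pairs f t hd init]
    rfl

lemma pvA_norm (L : Int) (s : String) :
    My_Long_Word L s = String.ofList ((pvPairs s.toList).flatMap (pvDA L s.toList)) := by
  have h1 : My_Long_Word L s = String.ofList
      ((PySem.List.pyRange 0 (pvCount (Get_Space_Position s.toList (pvCount s.toList)) - 1) 1).foldl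
        (fun result index =>
          if L + 1 < (PySem.List.pyGetD (Get_Space_Position s.toList (pvCount s.toList)) (index + 1) 0)
              - (PySem.List.pyGetD (Get_Space_Position s.toList (pvCount s.toList)) index 0) then
            result ++ Extract_Word_That_Match
              (PySem.List.pyGetD (Get_Space_Position s.toList (pvCount s.toList)) index 0)
              (PySem.List.pyGetD (Get_Space_Position s.toList (pvCount s.toList)) (index + 1) 0) s.toList ++ [' ']
          else result) []) := rfl
  rw [h1, pvGSP_eq]
  have hlen : pvCount ((pvEndsN s.toList).map (fun (n : Nat) => (n : Int)))
      = ((((pvEndsN s.toList).map (fun (n : Nat) => (n : Int))).length : Int)) := pvCount_eq _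
  rw [hlen]
  have hloop := pvFoldl_idx_pairs
    (fun r a b => if L + 1 < b - a then r ++ Extract_Word_That_Match a b s.toList ++ [' '] else r)
    ((pvEndsN s.toList).map (fun (n : Nat) => (n : Int))) []
  beta_reduce at hloop
  rw [hloop, ← List.map_tail, List.zip_map, List.foldl_map]
  rw [PySem.List.foldl_congr_mem ((pvEndsN s.toList).zip (pvEndsN s.toList).tail) _
    (fun r pq => r ++ pvDA L s.toList pq) [] ?_]
  · rw [PySem.List.foldl_append_eq_flatMap]
    rfl
  · intro acc pq hm
    rcases pq with ⟨p, q⟩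
    have hq : q ≤ s.toList.length :=
      pvEndsN_le s.toList q (List.mem_of_mem_tail (List.of_mem_zip hm).2)
    simp only [Prod.map_apply]
    rw [pvDA]
    by_cases h : L + 1 < (q : Int) - (p : Int)
    · rw [if_pos h, if_pos h, pvExtract_eq s.toList p q hq, List.append_assoc]
    · rw [if_neg h, if_neg h, List.append_nil]

lemma pvB_norm (L : Int) (s : String) :
    My_Long_Word_alt L s = String.ofList ((pvTokens s.toList).tail.flatMap (pvDB L)) := by
  have h1 : My_Long_Word_alt L s = String.ofList
      ((PySem.List.slice (PySem.Chars.splitOn s.toList [' ']) (some 1) none).foldl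
        (fun result word => if L < (word.length : Int) then result ++ word ++ [' '] else result) []) := rfl
  rw [h1, pvSplitOn_eq_tokens, PySem.List.slice_from_one]
  have hb : (fun (r : List Char) (w : List Char) => if L < (w.length : Int) then r ++ w ++ [' '] else r)
      = fun r w => r ++ pvDB L w := by
    funext r w
    rw [pvDB]
    split
    · rw [List.append_assoc]
    · rw [List.append_nil]
  rw [hb, PySem.List.foldl_append_eq_flatMap]
  rfl

lemma pvDA_shift (L : Int) (u v : List Char) (p q : Nat) :
    pvDA L (u ++ ' ' :: v) (p + (u.length + 1), q + (u.length + 1)) = pvDA L v (p, q) := by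
  rw [pvDA, pvDA]
  have hcond : (L + 1 < ((q + (u.length + 1) : Nat) : Int) - ((p + (u.length + 1) : Nat) : Int))
      ↔ (L + 1 < (q : Int) - (p : Int)) := by push_cast; omega
  have hdrop : (u ++ ' ' :: v).drop (p + (u.length + 1) + 1) = v.drop (p + 1) := by
    rw [List.drop_append]
    have h1 : u.drop (p + (u.length + 1) + 1) = [] := List.drop_eq_nil_of_le (by omega)
    have h2 : p + (u.length + 1) + 1 - u.length = p + 2 := by omega
    rw [h1, h2, List.nil_append, List.drop_succ_cons]
  have htake : q + (u.length + 1) - (p + (u.length + 1)) - 1 = q - p - 1 := by omega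
  simp only [hdrop, htake]
  rw [if_congr hcond rfl rfl]

lemma pvDA_head (L : Int) (u v : List Char) :
    pvDA L (u ++ ' ' :: v) (u.length, (v.takeWhile (· ≠ ' ')).length + (u.length + 1))
      = pvDB L (v.takeWhile (· ≠ ' ')) := by
  rw [pvDA, pvDB]
  have hcond : (L + 1 < (((v.takeWhile (· ≠ ' ')).length + (u.length + 1) : Nat) : Int) - ((u.length : Nat) : Int))
      ↔ (L < ((v.takeWhile (· ≠ ' ')).length : Int)) := by push_cast; omega
  have hdrop : (u ++ ' ' :: v).drop (u.length + 1) = v := by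
    rw [List.drop_append]
    have h1 : u.drop (u.length + 1) = [] := List.drop_eq_nil_of_le (by omega)
    have h2 : u.length + 1 - u.length = 1 := by omega
    rw [h1, h2, List.nil_append, List.drop_succ_cons, List.drop_zero]
  have htake : (v.takeWhile (· ≠ ' ')).length + (u.length + 1) - u.length - 1
      = (v.takeWhile (· ≠ ' ')).length := by omega
  have htw : v.take (v.takeWhile (· ≠ ' ')).length = v.takeWhile (· ≠ ' ') :=
    (List.prefix_iff_eq_take.1 (List.takeWhile_prefix _)).symm
  simp only [hdrop, htake, htw]
  rw [if_congr hcond rfl rfl]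

lemma pvMain (L : Int) : ∀ (n : Nat) (cs : List Char), cs.length ≤ n →
    (pvPairs cs).flatMap (pvDA L cs) = (pvTokens cs).tail.flatMap (pvDB L) := by
  intro n
  induction n with
  | zero =>
    intro cs h
    have : cs = [] := List.eq_nil_of_length_eq_zero (Nat.le_zero.mp h)
    subst this
    simp [pvPairs, pvEndsN, pvSpN, pvTokens]
  | succ n ih =>
    intro cs hcs
    by_cases hsp : ' ' ∈ cs
    · obtain ⟨u, v, rfl, hu⟩ := pvFirstSpace cs hsp
      obtain ⟨es, hE⟩ := pvEndsN_head v
      rw [pvPairs, pvEndsN_decomp u v hu]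
      rw [List.tail_cons]
      conv_lhs => rw [hE]
      rw [List.map_cons, List.zip_cons_cons, List.flatMap_cons]
      have hzip : ((((v.takeWhile (· ≠ ' ')).length + (u.length + 1)) :: es.map (· + (u.length + 1))).zip
            (es.map (· + (u.length + 1))))
          = ((((v.takeWhile (· ≠ ' ')).length :: es).map (· + (u.length + 1))).zip
            ((((v.takeWhile (· ≠ ' ')).length :: es).map (· + (u.length + 1))).tail)) := by
        rw [List.map_cons, List.tail_cons]
      rw [hzip, ← List.map_tail, List.zip_map, List.flatMap_map]
      have hpt : (fun (a : Nat × Nat) => pvDA L (u ++ ' ' :: v) (Prod.map (· + (u.length + 1)) (· + (u.length + 1)) a))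
          = pvDA L v := by
        funext pq
        rcases pq with ⟨p, q⟩
        exact pvDA_shift L u v p q
      rw [hpt]
      have hv : v.length ≤ n := by
        have := hcs
        simp [List.length_append] at this
        omega
      have hIH := ih v hv
      rw [pvPairs, hE] at hIH
      rw [hIH, pvDA_head L u v]
      rw [pvTokens_decomp u v hu, List.tail_cons]
      conv_rhs => rw [pvTokens_head v]
      rw [List.flatMap_cons]
    · rw [pvPairs, pvEndsN, pvSpN_nospace cs hsp, pvTokens_nospace cs hsp]
      simp

-- ===== VERDICT (by name: the statement is the Claim_ definition above) =====
theorem My_Long_Word_spec : Claim_equal_My_Long_Word := by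
  intro L s _
  unfold Spec_My_Long_Word
  rw [pvA_norm, pvB_norm]
  exact congrArg String.ofList (pvMain L s.toList.length s.toList le_rfl)
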